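-- pv_equiv track=rewrite | github.com/Alex-Norden/algo_train_yandex_2 | hw8/h8_d.py | _solution_slow
-- ===== SOURCE A (Python) =====
-- from collections import deque
--
-- def _solution_slow(n, g):
-- 	def get_len(start_v):
-- 		dists = [0] * n
-- 		dists[start_v] = 1
-- 		q = deque([start_v])
--
-- 		while q:
-- 			cur_v = q.popleft()
-- 			for neigh_v in g[cur_v]:
-- 				if not dists[neigh_v]:
-- 					dists[neigh_v] = dists[cur_v] + 1
-- 					q.append(neigh_v)
-- 		return max(dists)
--
-- 	max_len = 1
-- 	for v in range(n):
-- 		max_len = max(max_len, get_len(v))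
--
-- 	return max_len
-- ===== SOURCE B (Python) =====
-- def _solution_slow(n, g):
--     # Per-source eccentricity as the stabilization time of the one-step
--     # reachability operator on a boolean vector (iterated boolean
--     # matrix-vector expansion), instead of a BFS.
--     def ecc(v):
--         reach = [False] * n
--         reach[v] = True
--         d = 1
--         while True:
--             new = [reach[i] or any(reach[u] and i in g[u] for u in range(n))
--                    for i in range(n)]
--             if new == reach:
--                 return d
--             reach = new
--             d += 1
--
--     best = 1
--     for v in range(n):
--         best = max(best, ecc(v))
--     return best
-- ===== Notes on version B (the rewrite author's own statement) =====
-- stated objective: alternative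
-- what changed: Per-source BFS with a deque and distance array is replaced by a fixpoint iteration of the one-step reachability operator on a boolean vector (new[i] = reach[i] or exists u with reach[u] and i in g[u], i.e. an iterated boolean matrix-vector product scanned by target vertex), returning the number of rounds until the vector stabilizes; no queue, no frontier, no per-node distances.
-- outside the precondition, e.g. on _solution_slow(2, [[-1], []]): A returns 2, B returns 1
import Mathlib
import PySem

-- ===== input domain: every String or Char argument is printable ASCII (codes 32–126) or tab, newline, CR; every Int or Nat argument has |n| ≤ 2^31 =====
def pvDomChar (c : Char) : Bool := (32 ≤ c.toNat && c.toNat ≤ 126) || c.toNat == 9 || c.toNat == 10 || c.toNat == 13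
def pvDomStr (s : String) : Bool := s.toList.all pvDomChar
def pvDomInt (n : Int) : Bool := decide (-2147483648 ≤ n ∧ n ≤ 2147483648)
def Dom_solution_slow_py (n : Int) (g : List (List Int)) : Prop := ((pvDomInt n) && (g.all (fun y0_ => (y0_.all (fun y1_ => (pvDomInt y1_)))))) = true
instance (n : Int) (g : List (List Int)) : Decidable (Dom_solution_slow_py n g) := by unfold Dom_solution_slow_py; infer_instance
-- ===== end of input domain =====

-- B replaces A's per-source deque BFS with a per-source fixpoint iteration of the
-- one-step reachability operator on a boolean vector (iterated boolean matrix-vector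
-- expansion scanned by target vertex), counting rounds to stabilization; equal on Pre_.

-- ===== PORT A =====

-- Python 'dists[i] = v' (index already validated by the preceding 'dists[i]' read): exact via pyIdx?
def pvMark (D : List Int) (i : Int) (v : Int) : List Int :=
  match PySem.List.pyIdx? D.length i with
  | some k => D.set k v
  | none => D

def pvCountZeros (D : List Int) : Nat := D.count 0

-- one neighbour of the inner 'for neigh_v in g[cur_v]' loop; state = (dists, appended queue items).
-- '(… + 1) ≠ 0' is a totality guard for the termination measure: under Pre_ dists[cur] ≥ 1, so it is always true.
def pvAVisit (cur : Int) (acc : List Int × List Int) (w : Int) : List Int × List Int :=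
  if PySem.List.pyGet? acc.1 w = some 0 ∧ ((PySem.List.pyGet? acc.1 cur).getD 0) + 1 ≠ 0 then
    (pvMark acc.1 w (((PySem.List.pyGet? acc.1 cur).getD 0) + 1), acc.2 ++ [w])
  else acc

lemma pvMark_count (D : List Int) (w v : Int) (h : PySem.List.pyGet? D w = some 0) (hv : v ≠ 0) :
    pvCountZeros (pvMark D w v) + 1 = pvCountZeros D := by
  unfold PySem.List.pyGet? at h
  rcases hk : PySem.List.pyIdx? D.length w with _ | k <;> rw [hk] at h
  · simp at h
  · simp only [Option.bind] at h
    obtain ⟨hlt, h0⟩ := List.getElem?_eq_some_iff.mp h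
    have hmem : (0 : Int) ∈ D := by rw [← h0]; exact List.getElem_mem hlt
    have hpos : 0 < D.count 0 := List.count_pos_iff.mpr hmem
    unfold pvMark pvCountZeros
    rw [hk, List.count_set hlt]
    simp [h0, hv]
    omega

-- zero-count bookkeeping for one popped vertex (cited by pvALoop's termination proof)
lemma pvAStep_zeros (cur : Int) (row : List Int) :
    ∀ (D L : List Int),
      pvCountZeros (row.foldl (pvAVisit cur) (D, L)).1 + (row.foldl (pvAVisit cur) (D, L)).2.length
        = pvCountZeros D + L.length := by
  induction row with
  | nil => intro D L; simp
  | cons w row ih =>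
    intro D L
    simp only [List.foldl_cons]
    by_cases hc : PySem.List.pyGet? D w = some 0 ∧ ((PySem.List.pyGet? D cur).getD 0) + 1 ≠ 0
    · rw [show pvAVisit cur (D, L) w =
          (pvMark D w (((PySem.List.pyGet? D cur).getD 0) + 1), L ++ [w]) by
        simp [pvAVisit, hc.1, hc.2]]
      rw [ih]
      have := pvMark_count D w (((PySem.List.pyGet? D cur).getD 0) + 1) hc.1 hc.2
      simp only [List.length_append, List.length_cons, List.length_nil]
      omega
    · rw [show pvAVisit cur (D, L) w = (D, L) by simp only [pvAVisit]; rw [if_neg hc]]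
      exact ih D L

-- the 'while q:' loop, recursing on (number of unvisited vertices, queue length)
def pvALoop (g : List (List Int)) (q : List Int) (D : List Int) : List Int :=
  match q with
  | [] => D
  | cur :: rest =>
    pvALoop g (rest ++ (((PySem.List.pyGet? g cur).getD []).foldl (pvAVisit cur) (D, [])).2)
      (((PySem.List.pyGet? g cur).getD []).foldl (pvAVisit cur) (D, [])).1
termination_by (pvCountZeros D, q.length)
decreasing_by
  have h := pvAStep_zeros cur ((PySem.List.pyGet? g cur).getD []) D []
  simp only [List.length_nil, Nat.add_zero] at h
  rcases Nat.lt_or_ge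
      (pvCountZeros (((PySem.List.pyGet? g cur).getD []).foldl (pvAVisit cur) (D, [])).1)
      (pvCountZeros D) with hlt | hge
  · exact Prod.Lex.left _ _ hlt
  · have hz : pvCountZeros (((PySem.List.pyGet? g cur).getD []).foldl (pvAVisit cur) (D, [])).1
        = pvCountZeros D := by omega
    have hs : (((PySem.List.pyGet? g cur).getD []).foldl (pvAVisit cur) (D, [])).2.length = 0 := by
      omega
    rw [hz]
    refine Prod.Lex.right _ ?_
    simp [List.length_append, hs]

-- get_len(start_v): dists = [0]*n; dists[start_v] = 1; BFS; max(dists).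
-- max(dists): '.getD 0' is a totality default — get_len is only called with 0 ≤ v < n, so dists ≠ [].
def pvGetLen (n : Int) (g : List (List Int)) (v : Int) : Int :=
  let D := pvMark (List.replicate n.toNat (0 : Int)) v 1
  (PySem.List.max? (pvALoop g [v] D) (fun x => x)).getD 0

def solution_slow_py (n : Int) (g : List (List Int)) : Int :=
  (PySem.List.pyRange 0 n).foldl (fun m v => max m (pvGetLen n g v)) 1

-- ===== PORT B =====

-- Python 'reach[v] = True': exact via pyIdx?
def pvMarkB (R : List Bool) (i : Int) (v : Bool) : List Bool :=
  match PySem.List.pyIdx? R.length i with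
  | some k => R.set k v
  | none => R

-- one application of the one-step reachability operator:
-- new = [reach[i] or any(reach[u] and i in g[u] for u in range(n)) for i in range(n)]
-- reach[i]/reach[u] via pyGetD (totality default: indices are always in range here);
-- 'g[u]' via pyGet? with '.getD []' (totality default: u < n ≤ len(g) under Pre_).
def pvNewReach (n : Int) (g : List (List Int)) (R : List Bool) : List Bool :=
  (PySem.List.pyRange 0 n).map (fun i =>
    PySem.List.pyGetD R i false ||
    (PySem.List.pyRange 0 n).any (fun u =>
      PySem.List.pyGetD R u false && ((PySem.List.pyGet? g u).getD []).contains i))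

-- B's 'while True' loop; fuel is a totality bound only (n+1 rounds always suffice under Pre_)
def pvEccLoop (n : Int) (g : List (List Int)) : Nat → List Bool → Int → Int
  | 0, _, d => d
  | fuel + 1, R, d =>
    let R' := pvNewReach n g R
    if R' = R then d else pvEccLoop n g fuel R' (d + 1)

def solution_slow_py_alt (n : Int) (g : List (List Int)) : Int :=
  (PySem.List.pyRange 0 n).foldl
    (fun m v => max m (pvEccLoop n g (n.toNat + 1)
      (pvMarkB (List.replicate n.toNat false) v true) 1)) 1

-- ===== PRECONDITION & SPEC =====

-- Pre_ excludes exactly: n > len(g) or an adjacency entry ≥ n reachable from some start (A raises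
-- IndexError), and negative adjacency entries, where A's value relies on Python's negative-index
-- wraparound into the distance array — malformed input for an adjacency list of n vertices.
def Pre_solution_slow_py (n : Int) (g : List (List Int)) : Prop :=
  n ≤ g.length ∧ ∀ row ∈ g.take n.toNat, ∀ w ∈ row, 0 ≤ w ∧ w < n
instance (n : Int) (g : List (List Int)) : Decidable (Pre_solution_slow_py n g) := by
  unfold Pre_solution_slow_py; infer_instance

def pvWitness_solution_slow_py : Int × List (List Int) := (2, [[1], [0]])

def Spec_solution_slow_py (n : Int) (g : List (List Int)) (out : Int) : Prop := out = solution_slow_py_alt n g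
instance (n : Int) (g : List (List Int)) (out : Int) : Decidable (Spec_solution_slow_py n g out) := by unfold Spec_solution_slow_py; infer_instance

-- ===== CLAIM (what is proved, stated in full; the proofs are below) =====
def Claim_equal_solution_slow_py : Prop := ∀ (n : Int) (g : List (List Int)), Dom_solution_slow_py n g → Pre_solution_slow_py n g → Spec_solution_slow_py n g (solution_slow_py n g)

-- ===== LEMMAS AND PROOFS =====

-- Proof intermediate: a level-synchronous frontier BFS (visited set, frontier, depth).
-- A's queue loop is proved equal to it (pvMain), and it in turn equal to B's
-- reachability-vector iteration (pvBridge).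

def pvFVisit (acc : PySem.Set Int × List Int) (w : Int) : PySem.Set Int × List Int :=
  if PySem.Set.contains acc.1 w then acc else (PySem.Set.add acc.1 w, acc.2 ++ [w])

def pvFLevel (g : List (List Int)) (V : PySem.Set Int) (F : List Int) : PySem.Set Int × List Int :=
  F.foldl (fun acc u => ((PySem.List.pyGet? g u).getD []).foldl pvFVisit acc) (V, [])

def pvFLoop (g : List (List Int)) : Nat → PySem.Set Int → List Int → Int → Int
  | 0, _, _, d => d
  | fuel + 1, V, F, d =>
    let s := pvFLevel g V F
    if s.2 = [] then d else pvFLoop g fuel s.1 s.2 (d + 1)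

-- generic: a fold whose second component only appends commutes with a prefix of that component
lemma pvFoldl_pair_snd {α σ : Type} (f : σ × List Int → α → σ × List Int)
    (H : ∀ (s : σ) (L P : List Int) (x : α),
      f (s, P ++ L) x = ((f (s, L) x).1, P ++ (f (s, L) x).2)) :
    ∀ (xs : List α) (s : σ) (L P : List Int),
      xs.foldl f (s, P ++ L) = ((xs.foldl f (s, L)).1, P ++ (xs.foldl f (s, L)).2) := by
  intro xs
  induction xs with
  | nil => intro s L P; simp
  | cons x xs ih =>
    intro s L P
    simp only [List.foldl_cons]
    rw [H s L P x, ih (f (s, L) x).1 (f (s, L) x).2 P]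

lemma pvAVisit_snd_h (cur : Int) :
    ∀ (s : List Int) (L P : List Int) (x : Int),
      pvAVisit cur (s, P ++ L) x = ((pvAVisit cur (s, L) x).1, P ++ (pvAVisit cur (s, L) x).2) := by
  intro s L P x
  by_cases hc : PySem.List.pyGet? s x = some 0 ∧ ((PySem.List.pyGet? s cur).getD 0) + 1 ≠ 0
  · simp [pvAVisit, hc.1, hc.2]
  · simp only [pvAVisit]
    rw [if_neg hc, if_neg hc]

lemma pvAStepFold_snd (cur : Int) (row : List Int) (D L P : List Int) :
    row.foldl (pvAVisit cur) (D, P ++ L)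
      = ((row.foldl (pvAVisit cur) (D, L)).1, P ++ (row.foldl (pvAVisit cur) (D, L)).2) :=
  pvFoldl_pair_snd _ (pvAVisit_snd_h cur) row D L P

-- one whole BFS level of A, as a fold (proof-only helper)
def pvALevel (g : List (List Int)) (F : List Int) (D : List Int) : List Int × List Int :=
  F.foldl (fun acc cur => ((PySem.List.pyGet? g cur).getD []).foldl (pvAVisit cur) acc) (D, [])

lemma pvALevelFold_snd (g : List (List Int)) (F : List Int) (D : List Int) (L P : List Int) :
    F.foldl (fun acc cur => ((PySem.List.pyGet? g cur).getD []).foldl (pvAVisit cur) acc) (D, P ++ L)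
      = ((F.foldl (fun acc cur => ((PySem.List.pyGet? g cur).getD []).foldl (pvAVisit cur) acc) (D, L)).1,
          P ++ (F.foldl (fun acc cur => ((PySem.List.pyGet? g cur).getD []).foldl (pvAVisit cur) acc) (D, L)).2) :=
  pvFoldl_pair_snd _ (fun s L P x => by
    have := pvAStepFold_snd x ((PySem.List.pyGet? g x).getD []) s L P
    simpa using this) F D L P

-- A's queue loop, decomposed level by level
lemma pvALoop_level (g : List (List Int)) :
    ∀ (F P D : List Int),
      pvALoop g (F ++ P) D = pvALoop g (P ++ (pvALevel g F D).2) (pvALevel g F D).1 := by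
  intro F
  induction F with
  | nil => intro P D; simp [pvALevel]
  | cons c F ih =>
    intro P D
    rw [List.cons_append, pvALoop]
    have hstep : pvALevel g (c :: F) D
        = ((pvALevel g F (((PySem.List.pyGet? g c).getD []).foldl (pvAVisit c) (D, [])).1).1,
            (((PySem.List.pyGet? g c).getD []).foldl (pvAVisit c) (D, [])).2
              ++ (pvALevel g F (((PySem.List.pyGet? g c).getD []).foldl (pvAVisit c) (D, [])).1).2) := by
      show List.foldl _ (((PySem.List.pyGet? g c).getD []).foldl (pvAVisit c) (D, [])) F = _
      rw [← Prod.mk.eta (p := ((PySem.List.pyGet? g c).getD []).foldl (pvAVisit c) (D, []))]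
      rw [show (((PySem.List.pyGet? g c).getD []).foldl (pvAVisit c) (D, [])).2
            = (((PySem.List.pyGet? g c).getD []).foldl (pvAVisit c) (D, [])).2 ++ [] by simp]
      rw [pvALevelFold_snd]
      simp [pvALevel]
    rw [hstep]
    have := ih (P ++ (((PySem.List.pyGet? g c).getD []).foldl (pvAVisit c) (D, [])).2)
      (((PySem.List.pyGet? g c).getD []).foldl (pvAVisit c) (D, [])).1
    rw [← List.append_assoc] at this ⊢
    rw [← this]

lemma pvMax_getD_eq (D : List Int) (d : Int) (hmem : d ∈ D) (hub : ∀ y ∈ D, y ≤ d) :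
    (PySem.List.max? D (fun x => x)).getD 0 = d := by
  rcases h : PySem.List.max? D (fun x => x) with _ | m
  · rw [PySem.List.max?_eq_none_iff] at h
    subst h; simp at hmem
  · have h1 : m ∈ D := PySem.List.max?_mem h
    have h2 : d ≤ m := PySem.List.max?_isMax h d hmem
    have h3 : m ≤ d := hub m h1
    simp [le_antisymm h3 h2]

-- pyGet? facts used by the simulation
lemma pvPyGet?_set_preserve (D : List Int) (k : Nat) (v x u : Int) (hk : k < D.length)
    (hne : D[k] ≠ x) (hu : PySem.List.pyGet? D u = some x) :
    PySem.List.pyGet? (D.set k v) u = some x := by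
  unfold PySem.List.pyGet? at hu ⊢
  rcases hj : PySem.List.pyIdx? D.length u with _ | j <;> rw [hj] at hu
  · simp at hu
  · simp only [Option.bind] at hu
    obtain ⟨hjlt, hx⟩ := List.getElem?_eq_some_iff.mp hu
    have hne' : k ≠ j := by rintro rfl; exact hne hx
    rw [List.length_set, hj]
    simp only [Option.bind]
    rw [List.getElem?_set, if_neg hne', hu]

lemma pvMark_eq (D : List Int) (w v : Int) (h0 : 0 ≤ w) (h1 : w < (D.length : Int)) :
    pvMark D w v = D.set w.toNat v := by
  unfold pvMark PySem.List.pyIdx?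
  rw [if_pos h0, if_pos h1]

lemma pvMarkB_eq (R : List Bool) (w : Int) (v : Bool) (h0 : 0 ≤ w) (h1 : w < (R.length : Int)) :
    pvMarkB R w v = R.set w.toNat v := by
  unfold pvMarkB PySem.List.pyIdx?
  rw [if_pos h0, if_pos h1]

-- invariant tying A's distance array to the frontier BFS's visited set (m = current upper bound)
def pvInv (n m : Int) (D V : List Int) : Prop :=
  D.length = n.toNat ∧
  (∀ k (hk : k < D.length), (D[k] ≠ 0 ↔ (k : Int) ∈ V)) ∧
  (∀ x ∈ V, 0 ≤ x ∧ x < n) ∧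
  (∀ k (hk : k < D.length), 0 ≤ D[k] ∧ D[k] ≤ m)

-- what one row / one level of the two searches guarantees, relative to start state (D, L)
def pvPost (n d : Int) (D L : List Int) (a : List Int × List Int) (b : PySem.Set Int × List Int) : Prop :=
  b.2 = a.2 ∧
  pvInv n (d + 1) a.1 b.1 ∧
  (∀ u (x : Int), x ≠ 0 → PySem.List.pyGet? D u = some x → PySem.List.pyGet? a.1 u = some x) ∧
  (∀ u ∈ a.2, 0 ≤ u ∧ u < n ∧ PySem.List.pyGet? a.1 u = some (d + 1)) ∧
  (pvCountZeros a.1 + a.2.length = pvCountZeros D + L.length) ∧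
  (∀ k : Nat, a.1[k]? = D[k]? ∨ (k : Int) ∈ a.2) ∧
  (∃ t, a.2 = L ++ t)

-- one row (one popped vertex of A, one frontier vertex): the two folds stay in lock step
lemma pvRow_corr (n d cur : Int) (hd : 1 ≤ d) :
    ∀ (row D V L : List Int),
      (∀ w ∈ row, 0 ≤ w ∧ w < n) →
      pvInv n (d + 1) D V →
      PySem.List.pyGet? D cur = some d →
      (∀ u ∈ L, 0 ≤ u ∧ u < n ∧ PySem.List.pyGet? D u = some (d + 1)) →
      pvPost n d D L (row.foldl (pvAVisit cur) (D, L)) (row.foldl pvFVisit (V, L)) := by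
  intro row
  induction row with
  | nil =>
    intro D V L _ hinv hcur hL
    exact ⟨rfl, hinv, fun u x _ h => h, hL, by simp [List.foldl_nil], fun k => Or.inl rfl,
      ⟨[], by simp⟩⟩
  | cons w row ih =>
    intro D V L hrow hinv hcur hL
    obtain ⟨hlen, hiff, hV, hbd⟩ := hinv
    obtain ⟨hw0, hwn⟩ := hrow w (List.mem_cons_self ..)
    have hrow' := fun x hx => hrow x (List.mem_cons_of_mem _ hx)
    have hwlt : w.toNat < D.length := by omega
    have hwcast : (w.toNat : Int) = w := Int.toNat_of_nonneg hw0
    have hwget : PySem.List.pyGet? D w = some D[w.toNat] :=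
      PySem.List.pyGet?_eq_some_getElem D hw0 (by omega)
    simp only [List.foldl_cons]
    by_cases hDw : D[w.toNat] = 0
    · -- unvisited: A marks dists[w] = d+1 and appends; the frontier BFS adds w to visited and nxt
      have hcond : PySem.List.pyGet? D w = some 0 ∧ ((PySem.List.pyGet? D cur).getD 0) + 1 ≠ 0 :=
        ⟨by rw [hwget, hDw], by rw [hcur]; simp; omega⟩
      have hA : pvAVisit cur (D, L) w = (D.set w.toNat (d + 1), L ++ [w]) := by
        simp only [pvAVisit]
        rw [if_pos hcond]
        simp only [hcur, Option.getD_some]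
        rw [pvMark_eq D w _ hw0 (by omega)]
      have hwV : w ∉ V := by
        intro hmem
        exact (hiff w.toNat hwlt).mpr (by rwa [hwcast]) hDw
      have hB : pvFVisit (V, L) w = (V ++ [w], L ++ [w]) := by
        have hc : ¬ (PySem.Set.contains V w = true) :=
          fun h => hwV ((PySem.Set.contains_iff V w).mp h)
        simp only [pvFVisit]
        rw [if_neg hc, PySem.Set.add_of_not_mem hwV]
      rw [hA, hB]
      have hlen' : (D.set w.toNat (d + 1)).length = n.toNat := by simp [hlen]
      have hiff' : ∀ k (hk : k < (D.set w.toNat (d + 1)).length),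
          ((D.set w.toNat (d + 1))[k] ≠ 0 ↔ (k : Int) ∈ V ++ [w]) := by
        intro k hk
        have hk' : k < D.length := by simpa using hk
        rw [List.getElem_set]
        by_cases hkw : w.toNat = k
        · subst hkw
          rw [if_pos rfl]
          constructor
          · intro _
            rw [hwcast]
            simp
          · intro _
            omega
        · rw [if_neg hkw, hiff k hk']
          simp only [List.mem_append, List.mem_singleton]
          constructor
          · exact Or.inl
          · rintro (h | h)
            · exact h
            · exfalso; apply hkw; omega
      have hV' : ∀ x ∈ V ++ [w], 0 ≤ x ∧ x < n := by
        intro x hx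
        rcases List.mem_append.mp hx with h | h
        · exact hV x h
        · rw [List.mem_singleton] at h; subst h; exact ⟨hw0, hwn⟩
      have hbd' : ∀ k (hk : k < (D.set w.toNat (d + 1)).length),
          0 ≤ (D.set w.toNat (d + 1))[k] ∧ (D.set w.toNat (d + 1))[k] ≤ d + 1 := by
        intro k hk
        have hk' : k < D.length := by simpa using hk
        rw [List.getElem_set]
        split
        · omega
        · exact hbd k hk'
      have hcur' : PySem.List.pyGet? (D.set w.toNat (d + 1)) cur = some d :=
        pvPyGet?_set_preserve D w.toNat (d + 1) d cur hwlt (by omega) hcur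
      have hL' : ∀ u ∈ L ++ [w],
          0 ≤ u ∧ u < n ∧ PySem.List.pyGet? (D.set w.toNat (d + 1)) u = some (d + 1) := by
        intro u hu
        rcases List.mem_append.mp hu with h | h
        · obtain ⟨h1, h2, h3⟩ := hL u h
          exact ⟨h1, h2, pvPyGet?_set_preserve D w.toNat (d + 1) (d + 1) u hwlt (by omega) h3⟩
        · rw [List.mem_singleton] at h; subst h
          refine ⟨hw0, hwn, ?_⟩
          rw [PySem.List.pyGet?_eq_some_getElem _ hw0 (by simp [hlen]; omega)]
          congr 1
          rw [List.getElem_set, if_pos rfl]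
      have post := ih (D.set w.toNat (d + 1)) (V ++ [w]) (L ++ [w]) hrow'
        ⟨hlen', hiff', hV', hbd'⟩ hcur' hL'
      obtain ⟨p1, p2, p3, p4, p5, p6, p7⟩ := post
      obtain ⟨t, ht⟩ := p7
      refine ⟨p1, p2, ?_, p4, ?_, ?_, ⟨[w] ++ t, by rw [ht, List.append_assoc]⟩⟩
      · intro u x hx hu
        exact p3 u x hx (pvPyGet?_set_preserve D w.toNat (d + 1) x u hwlt (by omega) hu)
      · have hmc : pvCountZeros (D.set w.toNat (d + 1)) + 1 = pvCountZeros D := by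
          have := pvMark_count D w (d + 1) (by rw [hwget, hDw]) (by omega)
          rwa [pvMark_eq D w _ hw0 (by omega)] at this
        simp only [List.length_append, List.length_cons, List.length_nil] at p5 ⊢
        omega
      · intro k
        rcases p6 k with h | h
        · by_cases hkw : k = w.toNat
          · subst hkw
            right
            rw [ht]
            simp [hwcast]
          · left
            rw [h, List.getElem?_set, if_neg (fun hh => hkw hh.symm)]
        · exact Or.inr h
    · -- already visited: both sides skip
      have hA : pvAVisit cur (D, L) w = (D, L) := by
        simp only [pvAVisit]
        rw [if_neg]
        intro hc
        rw [hwget] at hc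
        exact hDw (Option.some.inj hc.1)
      have hB : pvFVisit (V, L) w = (V, L) := by
        have hwV : w ∈ V := by
          have h := (hiff w.toNat hwlt).mp hDw
          rwa [hwcast] at h
        simp only [pvFVisit]
        rw [if_pos ((PySem.Set.contains_iff V w).mpr hwV)]
      rw [hA, hB]
      exact ih D V L hrow' ⟨hlen, hiff, hV, hbd⟩ hcur hL

-- one whole level: compose pvRow_corr over the frontier
lemma pvLevel_corr (n d : Int) (g : List (List Int)) (hg : (n : Int) ≤ (g.length : Int))
    (hrows : ∀ row ∈ g.take n.toNat, ∀ w ∈ row, 0 ≤ w ∧ w < n) (hd : 1 ≤ d) :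
    ∀ (F D V L : List Int),
      pvInv n (d + 1) D V →
      (∀ u ∈ F, 0 ≤ u ∧ u < n ∧ PySem.List.pyGet? D u = some d) →
      (∀ u ∈ L, 0 ≤ u ∧ u < n ∧ PySem.List.pyGet? D u = some (d + 1)) →
      pvPost n d D L
        (F.foldl (fun acc cur => ((PySem.List.pyGet? g cur).getD []).foldl (pvAVisit cur) acc) (D, L))
        (F.foldl (fun acc u => ((PySem.List.pyGet? g u).getD []).foldl pvFVisit acc) (V, L)) := by
  intro F
  induction F with
  | nil =>
    intro D V L hinv _ hL
    exact ⟨rfl, hinv, fun u x _ h => h, hL, by simp, fun k => Or.inl rfl, ⟨[], by simp⟩⟩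
  | cons c F ih =>
    intro D V L hinv hF hL
    obtain ⟨hc0, hcn, hcget⟩ := hF c (List.mem_cons_self ..)
    have hF' := fun x hx => hF x (List.mem_cons_of_mem _ hx)
    have hrowg : PySem.List.pyGet? g c = some g[c.toNat] :=
      PySem.List.pyGet?_eq_some_getElem g hc0 (by omega)
    have hctn : c.toNat < (g.take n.toNat).length := by
      simp only [List.length_take]
      omega
    have hrowmem : g[c.toNat] ∈ g.take n.toNat := by
      have h1 : (g.take n.toNat)[c.toNat] ∈ g.take n.toNat := List.getElem_mem hctn
      rwa [List.getElem_take] at h1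
    have hrow := hrows _ hrowmem
    simp only [List.foldl_cons, hrowg, Option.getD_some]
    have post1 := pvRow_corr n d c hd g[c.toNat] D V L hrow hinv hcget hL
    obtain ⟨p1, p2, p3, p4, p5, p6, p7⟩ := post1
    rw [← Prod.mk.eta (p := g[c.toNat].foldl pvFVisit (V, L)), p1]
    have post2 := ih (g[c.toNat].foldl (pvAVisit c) (D, L)).1
      (g[c.toNat].foldl pvFVisit (V, L)).1 (g[c.toNat].foldl (pvAVisit c) (D, L)).2 p2
      (fun u hu => ⟨(hF' u hu).1, (hF' u hu).2.1, p3 u d (by omega) (hF' u hu).2.2⟩) p4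
    simp only [Prod.mk.eta] at post2
    obtain ⟨q1, q2, q3, q4, q5, q6, q7⟩ := post2
    obtain ⟨t1, ht1⟩ := p7
    obtain ⟨t2, ht2⟩ := q7
    refine ⟨q1, q2, ?_, q4, ?_, ?_, ⟨t1 ++ t2, ?_⟩⟩
    · exact fun u x hx hu => q3 u x hx (p3 u x hx hu)
    · omega
    · intro k
      rcases q6 k with h | h
      · rcases p6 k with h' | h'
        · exact Or.inl (h.trans h')
        · refine Or.inr ?_
          rw [ht2]
          exact List.mem_append.mpr (Or.inl h')
      · exact Or.inr h
    · rw [ht2, ht1, List.append_assoc]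

-- the whole search from a frontier of equal-distance vertices: A's queue BFS = frontier BFS
lemma pvMain (n : Int) (g : List (List Int)) (hg : (n : Int) ≤ (g.length : Int))
    (hrows : ∀ row ∈ g.take n.toNat, ∀ w ∈ row, 0 ≤ w ∧ w < n) :
    ∀ (fuel : Nat) (D V F : List Int) (d : Int),
      pvCountZeros D < fuel → 1 ≤ d → F ≠ [] →
      pvInv n d D V →
      (∀ u ∈ F, 0 ≤ u ∧ u < n ∧ PySem.List.pyGet? D u = some d) →
      (PySem.List.max? (pvALoop g F D) (fun x => x)).getD 0 = pvFLoop g fuel V F d := by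
  intro fuel
  induction fuel with
  | zero => intro D V F d hfuel; exact absurd hfuel (Nat.not_lt_zero _)
  | succ fuel ih =>
    intro D V F d hfuel hd hF0 hinv hF
    have hinv' : pvInv n (d + 1) D V := by
      obtain ⟨h1, h2, h3, h4⟩ := hinv
      exact ⟨h1, h2, h3, fun k hk => ⟨(h4 k hk).1, by have := (h4 k hk).2; omega⟩⟩
    have hlevel := pvLevel_corr n d g hg hrows hd F D V [] hinv' hF (by simp)
    have eA : pvALevel g F D
        = F.foldl (fun acc cur => ((PySem.List.pyGet? g cur).getD []).foldl (pvAVisit cur) acc) (D, []) := rfl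
    have eB : pvFLevel g V F
        = F.foldl (fun acc u => ((PySem.List.pyGet? g u).getD []).foldl pvFVisit acc) (V, []) := rfl
    rw [← eA, ← eB] at hlevel
    obtain ⟨p1, p2, p3, p4, p5, p6, p7⟩ := hlevel
    have hA := pvALoop_level g F [] D
    rw [List.append_nil, List.nil_append] at hA
    rw [hA]
    show _ = pvFLoop g (fuel + 1) V F d
    rw [pvFLoop]
    by_cases hnil : (pvALevel g F D).2 = []
    · rw [if_pos (by rw [p1]; exact hnil), hnil]
      rw [show pvALoop g [] (pvALevel g F D).1 = (pvALevel g F D).1 from by simp [pvALoop]]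
      have hDeq : (pvALevel g F D).1 = D :=
        List.ext_getElem? (fun k => (p6 k).resolve_right (by rw [hnil]; simp))
      rw [hDeq]
      obtain ⟨u, F', rfl⟩ : ∃ u F', F = u :: F' := by
        cases F with
        | nil => exact absurd rfl hF0
        | cons u F' => exact ⟨u, F', rfl⟩
      obtain ⟨hu0, hun, huget⟩ := hF u (List.mem_cons_self ..)
      apply pvMax_getD_eq
      · exact PySem.List.mem_of_pyGet?_eq_some D huget
      · intro y hy
        obtain ⟨k, hk, rfl⟩ := List.mem_iff_getElem.mp hy
        exact (hinv.2.2.2 k hk).2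
    · rw [if_neg (by rw [p1]; exact hnil), p1]
      apply ih (pvALevel g F D).1 (pvFLevel g V F).1 (pvALevel g F D).2 (d + 1) ?_ (by omega) hnil p2 p4
      have hlen1 : 1 ≤ (pvALevel g F D).2.length := by
        cases h : (pvALevel g F D).2 with
        | nil => exact absurd h hnil
        | cons a l => simp
      simp only [List.length_nil, Nat.add_zero] at p5
      omega

-- ===== bridge: frontier BFS = B's reachability-vector fixpoint iteration =====

-- membership through one row of the frontier fold
lemma pvRow_mem (row : List Int) :
    ∀ (acc : PySem.Set Int × List Int) (x : Int),
      (x ∈ (row.foldl pvFVisit acc).1 ↔ x ∈ acc.1 ∨ x ∈ row) ∧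
      (x ∈ (row.foldl pvFVisit acc).2 ↔ x ∈ acc.2 ∨ (x ∈ row ∧ x ∉ acc.1)) := by
  induction row with
  | nil => intro acc x; simp
  | cons w row ih =>
    intro acc x
    simp only [List.foldl_cons]
    by_cases hc : PySem.Set.contains acc.1 w = true
    · have hwV : w ∈ acc.1 := (PySem.Set.contains_iff acc.1 w).mp hc
      rw [show pvFVisit acc w = acc by simp only [pvFVisit]; rw [if_pos hc]]
      obtain ⟨h1, h2⟩ := ih acc x
      by_cases hxw : x = w
      · subst hxw
        constructor
        · rw [h1]; simp only [List.mem_cons]; tauto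
        · rw [h2]; simp only [List.mem_cons]; tauto
      · constructor
        · rw [h1]; simp only [List.mem_cons]; tauto
        · rw [h2]; simp only [List.mem_cons]; tauto
    · have hwV : w ∉ acc.1 := fun h => hc ((PySem.Set.contains_iff acc.1 w).mpr h)
      rw [show pvFVisit acc w = (acc.1 ++ [w], acc.2 ++ [w]) by
        simp only [pvFVisit]; rw [if_neg hc, PySem.Set.add_of_not_mem hwV]]
      obtain ⟨h1, h2⟩ := ih (acc.1 ++ [w], acc.2 ++ [w]) x
      simp only [List.mem_append, List.mem_singleton, List.mem_cons] at h1 h2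
      by_cases hxw : x = w
      · subst hxw
        constructor
        · rw [h1]; simp only [List.mem_cons]; tauto
        · rw [h2]; simp only [List.mem_cons]; tauto
      · constructor
        · rw [h1]; simp only [List.mem_cons]; tauto
        · rw [h2]; simp only [List.mem_cons]; tauto

-- membership through one whole level of the frontier fold
set_option maxHeartbeats 1000000 in
lemma pvFLevelGen_mem (g : List (List Int)) (F : List Int) :
    ∀ (acc : PySem.Set Int × List Int) (x : Int),
      (x ∈ (F.foldl (fun acc u => ((PySem.List.pyGet? g u).getD []).foldl pvFVisit acc) acc).1
        ↔ x ∈ acc.1 ∨ ∃ u ∈ F, x ∈ (PySem.List.pyGet? g u).getD []) ∧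
      (x ∈ (F.foldl (fun acc u => ((PySem.List.pyGet? g u).getD []).foldl pvFVisit acc) acc).2
        ↔ x ∈ acc.2 ∨ (x ∉ acc.1 ∧ ∃ u ∈ F, x ∈ (PySem.List.pyGet? g u).getD [])) := by
  induction F with
  | nil => intro acc x; simp
  | cons c F ih =>
    intro acc x
    simp only [List.foldl_cons]
    obtain ⟨r1, r2⟩ := pvRow_mem ((PySem.List.pyGet? g c).getD []) acc x
    obtain ⟨h1, h2⟩ := ih (((PySem.List.pyGet? g c).getD []).foldl pvFVisit acc) x
    constructor
    · rw [h1, r1]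
      simp only [List.mem_cons]
      constructor
      · rintro ((h | h) | ⟨u, hu, hx⟩)
        · tauto
        · exact Or.inr ⟨c, Or.inl rfl, h⟩
        · exact Or.inr ⟨u, Or.inr hu, hx⟩
      · rintro (h | ⟨u, (hu | hu), hx⟩)
        · tauto
        · subst hu; tauto
        · exact Or.inr ⟨u, hu, hx⟩
    · rw [h2, r2, r1]
      simp only [List.mem_cons]
      constructor
      · rintro ((h | h) | ⟨hnv, u, hu, hx⟩)
        · tauto
        · exact Or.inr ⟨h.2, c, Or.inl rfl, h.1⟩
        · exact Or.inr ⟨fun hv => hnv (Or.inl hv), u, Or.inr hu, hx⟩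
      · rintro (h | ⟨hnv, u, (hu | hu), hx⟩)
        · tauto
        · subst hu; exact Or.inl (Or.inr ⟨hx, hnv⟩)
        · by_cases hxc : x ∈ (PySem.List.pyGet? g c).getD []
          · exact Or.inl (Or.inr ⟨hxc, hnv⟩)
          · exact Or.inr ⟨fun h => (h.elim hnv hxc), u, hu, hx⟩

-- valid vertices have in-range rows whose entries are valid
lemma pvRow_valid (n : Int) (g : List (List Int)) (hg : (n : Int) ≤ (g.length : Int))
    (hrows : ∀ row ∈ g.take n.toNat, ∀ w ∈ row, 0 ≤ w ∧ w < n)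
    (u : Int) (h0 : 0 ≤ u) (h1 : u < n) :
    ∀ w ∈ (PySem.List.pyGet? g u).getD [], 0 ≤ w ∧ w < n := by
  have hrowg : PySem.List.pyGet? g u = some g[u.toNat] :=
    PySem.List.pyGet?_eq_some_getElem g h0 (by omega)
  rw [hrowg, Option.getD_some]
  have hctn : u.toNat < (g.take n.toNat).length := by
    simp only [List.length_take]; omega
  have hrowmem : g[u.toNat] ∈ g.take n.toNat := by
    have h1' : (g.take n.toNat)[u.toNat] ∈ g.take n.toNat := List.getElem_mem hctn
    rwa [List.getElem_take] at h1'
  exact hrows _ hrowmem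

-- the invariant tying the frontier BFS state (V, F) to B's boolean vector R
def pvRInv (n : Int) (g : List (List Int)) (V F : List Int) (R : List Bool) : Prop :=
  R = (PySem.List.pyRange 0 n).map (fun i => decide (i ∈ V)) ∧
  (∀ x ∈ V, 0 ≤ x ∧ x < n) ∧
  (∀ x ∈ F, x ∈ V) ∧
  (∀ u ∈ V, u ∉ F → ∀ w ∈ (PySem.List.pyGet? g u).getD [], w ∈ V)

-- the computed new vector, characterised entrywise
lemma pvNewReach_entry (n : Int) (g : List (List Int)) (V : List Int)
    (hV : ∀ x ∈ V, 0 ≤ x ∧ x < n) (i : Int) (hi : i ∈ PySem.List.pyRange 0 n) :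
    (PySem.List.pyGetD ((PySem.List.pyRange 0 n).map (fun j => decide (j ∈ V))) i false ||
      (PySem.List.pyRange 0 n).any (fun u =>
        PySem.List.pyGetD ((PySem.List.pyRange 0 n).map (fun j => decide (j ∈ V))) u false &&
          ((PySem.List.pyGet? g u).getD []).contains i))
    = decide (i ∈ V ∨ ∃ u ∈ V, i ∈ (PySem.List.pyGet? g u).getD []) := by
  rw [PySem.List.mem_pyRange_one] at hi
  rw [PySem.List.pyGetD_map_pyRange_of_nonneg _ _ _ _ hi.1 hi.2]
  have hany : (PySem.List.pyRange 0 n).any (fun u =>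
      PySem.List.pyGetD ((PySem.List.pyRange 0 n).map (fun j => decide (j ∈ V))) u false &&
        ((PySem.List.pyGet? g u).getD []).contains i)
      = decide (∃ u ∈ V, i ∈ (PySem.List.pyGet? g u).getD []) := by
    rcases h : decide (∃ u ∈ V, i ∈ (PySem.List.pyGet? g u).getD []) with _ | _
    · rw [List.any_eq_false]
      intro u hu
      rw [PySem.List.mem_pyRange_one] at hu
      rw [PySem.List.pyGetD_map_pyRange_of_nonneg _ _ _ _ hu.1 hu.2]
      simp only [Bool.and_eq_true, decide_eq_true_eq, List.contains_eq_mem, not_and]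
      intro huV hmem
      have := of_decide_eq_false h
      exact absurd ⟨u, huV, by simpa using hmem⟩ this
    · rw [List.any_eq_true]
      obtain ⟨u, huV, hmem⟩ := of_decide_eq_true h
      refine ⟨u, ?_, ?_⟩
      · rw [PySem.List.mem_pyRange_one]
        exact (hV u huV)
      · obtain ⟨hu0, hun⟩ := hV u huV
        rw [PySem.List.pyGetD_map_pyRange_of_nonneg _ _ _ _ hu0 hun]
        simp [huV, hmem]
  rw [hany]
  rcases h1 : decide (i ∈ V) with _ | _ <;> rcases h2 : decide (∃ u ∈ V, i ∈ (PySem.List.pyGet? g u).getD []) with _ | _ <;>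
    simp_all

-- the bridge: same fuel, lock-step rounds
lemma pvBridge (n : Int) (g : List (List Int)) (hg : (n : Int) ≤ (g.length : Int))
    (hrows : ∀ row ∈ g.take n.toNat, ∀ w ∈ row, 0 ≤ w ∧ w < n) :
    ∀ (fuel : Nat) (V F : List Int) (R : List Bool) (d : Int),
      pvRInv n g V F R → pvFLoop g fuel V F d = pvEccLoop n g fuel R d := by
  intro fuel
  induction fuel with
  | zero => intro V F R d _; rfl
  | succ fuel ih =>
    intro V F R d hinv
    obtain ⟨hR, hV, hFV, hcl⟩ := hinv
    have hNV : ∀ x, (x ∈ V ∨ ∃ u ∈ V, x ∈ (PySem.List.pyGet? g u).getD [])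
        ↔ (x ∈ V ∨ (x ∉ V ∧ ∃ u ∈ F, x ∈ (PySem.List.pyGet? g u).getD [])) := by
      intro x
      constructor
      · rintro (h | ⟨u, huV, hx⟩)
        · exact Or.inl h
        · by_cases hxV : x ∈ V
          · exact Or.inl hxV
          · by_cases huF : u ∈ F
            · exact Or.inr ⟨hxV, u, huF, hx⟩
            · exact absurd (hcl u huV huF x hx) hxV
      · rintro (h | ⟨_, u, huF, hx⟩)
        · exact Or.inl h
        · exact Or.inr ⟨u, hFV u huF, hx⟩
    -- entries of the new vector
    have hentry : ∀ i ∈ PySem.List.pyRange 0 n,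
        (fun i => PySem.List.pyGetD R i false ||
          (PySem.List.pyRange 0 n).any (fun u =>
            PySem.List.pyGetD R u false && ((PySem.List.pyGet? g u).getD []).contains i)) i
        = decide (i ∈ V ∨ ∃ u ∈ V, i ∈ (PySem.List.pyGet? g u).getD []) := by
      intro i hi
      rw [hR]
      exact pvNewReach_entry n g V hV i hi
    have hNR : pvNewReach n g R
        = (PySem.List.pyRange 0 n).map
            (fun i => decide (i ∈ V ∨ ∃ u ∈ V, i ∈ (PySem.List.pyGet? g u).getD [])) := by
      unfold pvNewReach
      exact List.map_congr_left hentry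
    -- frontier-level result
    set s := pvFLevel g V F with hs
    have hmem1 : ∀ x, x ∈ s.1 ↔ x ∈ V ∨ ∃ u ∈ F, x ∈ (PySem.List.pyGet? g u).getD [] :=
      fun x => (pvFLevelGen_mem g F (V, []) x).1
    have hmem2 : ∀ x, x ∈ s.2 ↔ x ∉ V ∧ ∃ u ∈ F, x ∈ (PySem.List.pyGet? g u).getD [] := by
      intro x
      have := (pvFLevelGen_mem g F (V, []) x).2
      simpa using this
    -- validity of new visited elements
    have hV1 : ∀ x ∈ s.1, 0 ≤ x ∧ x < n := by
      intro x hx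
      rcases (hmem1 x).mp hx with h | ⟨u, huF, hxu⟩
      · exact hV x h
      · obtain ⟨hu0, hun⟩ := hV u (hFV u huF)
        exact pvRow_valid n g hg hrows u hu0 hun x hxu
    -- the stop conditions agree
    have hstop : (s.2 = []) ↔ (pvNewReach n g R = R) := by
      constructor
      · intro hnil
        rw [hNR, hR]
        apply List.map_congr_left
        intro i hi
        have hiB := PySem.List.mem_pyRange_one.mp hi
        rcases h : decide (i ∈ V) with _ | _
        · have hiV : i ∉ V := of_decide_eq_false h
          rcases h2 : decide (i ∈ V ∨ ∃ u ∈ V, i ∈ (PySem.List.pyGet? g u).getD []) with _ | _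
          · rfl
          · exfalso
            have := (hNV i).mp (of_decide_eq_true h2)
            rcases this with hh | ⟨_, hex⟩
            · exact hiV hh
            · have : i ∈ s.2 := (hmem2 i).mpr ⟨hiV, hex⟩
              rw [hnil] at this; simp at this
        · have hiV : i ∈ V := of_decide_eq_true h
          simp [hiV]
      · intro heq
        rw [List.eq_nil_iff_forall_not_mem]
        intro x hx
        obtain ⟨hxV, hex⟩ := (hmem2 x).mp hx
        obtain ⟨u, huF, hxu⟩ := hex
        obtain ⟨hu0, hun⟩ := hV u (hFV u huF)
        have hxval : 0 ≤ x ∧ x < n := pvRow_valid n g hg hrows u hu0 hun x hxu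
        -- the entry at x flips from false to true, contradicting heq
        have hxmem : x ∈ PySem.List.pyRange 0 n := PySem.List.mem_pyRange_one.mpr hxval
        have h1 : PySem.List.pyGetD (pvNewReach n g R) x false
            = decide (x ∈ V ∨ ∃ u ∈ V, x ∈ (PySem.List.pyGet? g u).getD []) := by
          rw [hNR]
          exact PySem.List.pyGetD_map_pyRange_of_nonneg _ _ _ _ hxval.1 hxval.2
        have h2 : PySem.List.pyGetD R x false = decide (x ∈ V) := by
          rw [hR]
          exact PySem.List.pyGetD_map_pyRange_of_nonneg _ _ _ _ hxval.1 hxval.2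
        rw [heq, h2] at h1
        have htrue : (x ∈ V ∨ ∃ u ∈ V, x ∈ (PySem.List.pyGet? g u).getD []) :=
          Or.inr ⟨u, hFV u huF, hxu⟩
        rw [decide_eq_true htrue] at h1
        exact hxV (of_decide_eq_true h1)
    -- step both loops
    rw [pvFLoop, pvEccLoop]
    simp only [← hs]
    by_cases hnil : s.2 = []
    · rw [if_pos hnil, if_pos (hstop.mp hnil)]
    · rw [if_neg hnil, if_neg (fun h => hnil (hstop.mpr h))]
      apply ih
      refine ⟨?_, hV1, fun x hx => (hmem1 x).mpr (Or.inr ((hmem2 x).mp hx).2), ?_⟩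
      · rw [hNR]
        apply List.map_congr_left
        intro i hi
        have : (i ∈ V ∨ ∃ u ∈ V, i ∈ (PySem.List.pyGet? g u).getD []) ↔ i ∈ s.1 := by
          rw [hmem1 i, hNV i]
          constructor
          · rintro (h | ⟨_, hex⟩) <;> tauto
          · rintro (h | hex)
            · tauto
            · by_cases hiV : i ∈ V <;> tauto
        exact decide_eq_decide.mpr this
      · -- closure for the new state
        intro u huV1 hunF w hw
        rcases (hmem1 u).mp huV1 with huV | hex
        · by_cases huF : u ∈ F
          · exact (hmem1 w).mpr (Or.inr ⟨u, huF, hw⟩)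
          · exact (hmem1 w).mpr (Or.inl (hcl u huV huF w hw))
        · by_cases huV : u ∈ V
          · by_cases huF : u ∈ F
            · exact (hmem1 w).mpr (Or.inr ⟨u, huF, hw⟩)
            · exact (hmem1 w).mpr (Or.inl (hcl u huV huF w hw))
          · exact absurd ((hmem2 u).mpr ⟨huV, hex⟩) hunF

-- initial vector = characteristic vector of {v}
lemma pvInitR (n v : Int) (h0 : 0 ≤ v) (h1 : v < n) :
    pvMarkB (List.replicate n.toNat false) v true
      = (PySem.List.pyRange 0 n).map (fun i => decide (i ∈ ([v] : List Int))) := by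
  rw [pvMarkB_eq _ _ _ h0 (by simp; omega)]
  apply List.ext_getElem
  · simp only [List.length_set, List.length_replicate, List.length_map,
      PySem.List.length_pyRange_one]
    omega
  · intro k hk1 hk2
    simp only [List.length_set, List.length_replicate] at hk1
    rw [List.getElem_set, List.getElem_map, PySem.List.getElem_pyRange_one]
    by_cases hkv : v.toNat = k
    · have hv : ((0 : Int) + (k : Int)) ∈ ([v] : List Int) := by
        rw [List.mem_singleton]; omega
      rw [if_pos hkv]
      exact (decide_eq_true hv).symm
    · have hv : ¬ (((0 : Int) + (k : Int)) ∈ ([v] : List Int)) := by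
        rw [List.mem_singleton]; omega
      rw [if_neg hkv, List.getElem_replicate]
      exact (decide_eq_false hv).symm

theorem solution_slow_py_spec : Claim_equal_solution_slow_py := by
  unfold Claim_equal_solution_slow_py
  intro n g _ hpre
  obtain ⟨hg, hrows⟩ := hpre
  unfold Spec_solution_slow_py solution_slow_py solution_slow_py_alt
  apply PySem.List.foldl_congr_mem
  intro acc v hv
  rw [PySem.List.mem_pyRange_one] at hv
  obtain ⟨hv0, hvn⟩ := hv
  congr 1
  unfold pvGetLen
  have hglen : (n : Int) ≤ (g.length : Int) := by exact_mod_cast hg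
  have hrlen : (List.replicate n.toNat (0 : Int)).length = n.toNat := List.length_replicate
  have hvlt : v.toNat < n.toNat := by omega
  have hget0 : PySem.List.pyGet? (List.replicate n.toNat (0 : Int)) v = some 0 := by
    rw [PySem.List.pyGet?_eq_some_getElem _ hv0 (by rw [hrlen]; omega)]
    rw [List.getElem_replicate]
  have hmark : pvMark (List.replicate n.toNat (0 : Int)) v 1
      = (List.replicate n.toNat (0 : Int)).set v.toNat 1 :=
    pvMark_eq _ v 1 hv0 (by rw [hrlen]; omega)
  have hbfs : (PySem.List.max? (pvALoop g [v]
        (pvMark (List.replicate n.toNat (0 : Int)) v 1)) (fun x => x)).getD 0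
      = pvFLoop g (n.toNat + 1) (PySem.Set.ofList [v]) [v] 1 := by
    rw [show PySem.Set.ofList [v] = ([v] : List Int) from rfl]
    apply pvMain n g hglen hrows (n.toNat + 1) _ [v] [v] 1 ?_ le_rfl (by simp) ?_ ?_
    · have hc := pvMark_count (List.replicate n.toNat (0 : Int)) v 1 hget0 one_ne_zero
      have hrc : pvCountZeros (List.replicate n.toNat (0 : Int)) = n.toNat := by
        unfold pvCountZeros
        simp
      omega
    · rw [hmark]
      refine ⟨by simp [hrlen], ?_, ?_, ?_⟩
      · intro k hk
        have hk' : k < n.toNat := by simpa [hrlen] using hk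
        rw [List.getElem_set]
        by_cases hkv : v.toNat = k
        · subst hkv
          rw [if_pos rfl]
          simp only [List.mem_singleton]
          constructor
          · intro _; omega
          · intro _; omega
        · rw [if_neg hkv, List.getElem_replicate]
          simp only [List.mem_singleton]
          constructor
          · intro h; exact absurd rfl h
          · intro h; exfalso; apply hkv; omega
      · intro x hx
        rw [List.mem_singleton] at hx
        subst hx
        exact ⟨hv0, hvn⟩
      · intro k hk
        rw [List.getElem_set]
        split
        · omega
        · rw [List.getElem_replicate]
          omega
    · intro u hu
      rw [List.mem_singleton] at hu
      subst hu
      refine ⟨hv0, hvn, ?_⟩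
      rw [hmark]
      rw [PySem.List.pyGet?_eq_some_getElem _ hv0 (by simp [hrlen]; omega)]
      congr 1
      rw [List.getElem_set, if_pos rfl]
  rw [hbfs]
  apply pvBridge n g hglen hrows
  refine ⟨?_, ?_, ?_, ?_⟩
  · rw [show PySem.Set.ofList [v] = ([v] : List Int) from rfl]
    exact pvInitR n v hv0 hvn
  · intro x hx
    rw [show PySem.Set.ofList [v] = ([v] : List Int) from rfl, List.mem_singleton] at hx
    subst hx
    exact ⟨hv0, hvn⟩
  · intro x hx
    exact hx
  · intro u huV hunF
    exact absurd huV hunF
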